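-- pv_equiv track=rewrite | github.com/worrellburton/catalog | agents/video-generator/ad_generator.py | _pick_images_for_ad
-- ===== SOURCE A (Python) =====
-- MAX_REFERENCE_IMAGES = 3
--
-- def _pick_images_for_ad(images: list[str], ad_index: int) -> list[str]:
--     """Pick up to MAX_REFERENCE_IMAGES for this ad, cycling through available images.
--
--     Each ad variant starts at a different offset to use different image sets.
--     """
--     if not images:
--         return []
--     n = len(images)
--     offset = (ad_index * MAX_REFERENCE_IMAGES) % n
--     picked = []
--     for i in range(min(MAX_REFERENCE_IMAGES, n)):
--         picked.append(images[(offset + i) % n])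
--     return picked
-- ===== SOURCE B (Python) =====
-- MAX_REFERENCE_IMAGES = 3
--
-- def _pick_images_for_ad(images: list[str], ad_index: int) -> list[str]:
--     """Pick up to MAX_REFERENCE_IMAGES for this ad, cycling through available images."""
--     if not images:
--         return []
--     n = len(images)
--     count = min(MAX_REFERENCE_IMAGES, n)
--     offset = (ad_index * MAX_REFERENCE_IMAGES) % n
--     head = images[offset:offset + count]
--     if offset + count > n:
--         return head + images[:offset + count - n]
--     return head
-- ===== Notes on version B (the rewrite author's own statement) =====
-- stated objective: simpler
-- what changed: Replaces the element-wise loop with modular indexing by one slice images[offset:offset+count] plus, only when the window wraps past the end, a second slice images[:offset+count-n], concatenated.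
import Mathlib
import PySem

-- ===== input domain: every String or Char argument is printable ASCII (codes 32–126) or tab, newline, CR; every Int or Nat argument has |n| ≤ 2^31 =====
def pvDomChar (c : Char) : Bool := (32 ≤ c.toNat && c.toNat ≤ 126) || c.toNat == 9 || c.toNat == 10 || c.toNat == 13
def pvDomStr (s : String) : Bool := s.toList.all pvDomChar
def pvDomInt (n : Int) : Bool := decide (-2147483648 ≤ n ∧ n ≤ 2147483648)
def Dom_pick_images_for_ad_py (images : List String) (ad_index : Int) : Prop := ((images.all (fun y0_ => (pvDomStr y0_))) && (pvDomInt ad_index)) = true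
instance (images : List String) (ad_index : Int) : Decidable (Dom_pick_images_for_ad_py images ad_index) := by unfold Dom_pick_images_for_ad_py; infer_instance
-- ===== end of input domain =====

-- ===== PORT A =====
-- literal port of _pick_images_for_ad: loop over range(min(3, n)), appending images[(offset+i)%n]
def pick_images_for_ad_py (images : List String) (ad_index : Int) : List String :=
  if images = [] then []
  else
    let n : Int := images.length
    let offset : Int := PySem.Int.mod (ad_index * 3) n
    (PySem.List.pyRange 0 (min 3 n)).foldl
      (fun picked i => picked ++ [PySem.List.pyGetD images (PySem.Int.mod (offset + i) n) ""]) []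

-- ===== PORT B =====
-- B: one slice for the window, plus a second slice only when the window wraps past the end
def pick_images_for_ad_py_alt (images : List String) (ad_index : Int) : List String :=
  if images = [] then []
  else
    let n : Int := images.length
    let count : Int := min 3 n
    let offset : Int := PySem.Int.mod (ad_index * 3) n
    let head := PySem.List.slice images (some offset) (some (offset + count))
    if offset + count > n then head ++ PySem.List.slice images none (some (offset + count - n))
    else head

-- ===== PRECONDITION & SPEC =====
def Spec_pick_images_for_ad_py (images : List String) (ad_index : Int) (out : List String) : Prop := out = pick_images_for_ad_py_alt images ad_index
instance (images : List String) (ad_index : Int) (out : List String) : Decidable (Spec_pick_images_for_ad_py images ad_index out) := by unfold Spec_pick_images_for_ad_py; infer_instance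

-- ===== CLAIM (what is proved, stated in full; the proofs are below) =====
def Claim_equal_pick_images_for_ad_py : Prop := ∀ (images : List String) (ad_index : Int), Dom_pick_images_for_ad_py images ad_index → Spec_pick_images_for_ad_py images ad_index (pick_images_for_ad_py images ad_index)

-- ===== LEMMAS AND PROOFS =====

-- ===== VERDICT (by name: the statement is the Claim_ definition above) =====
-- Core list fact: the cyclic window of length c starting at o equals the slice
-- (drop o).take c, plus a leading take when the window wraps.
theorem cyclic_window_eq (xs : List String) (o c : Nat) (ho : o < xs.length)
    (hc : c <= xs.length) :
    (List.range c).map (fun i => xs.getD ((o + i) % xs.length) "") =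
      (if xs.length < o + c
       then (xs.drop o).take c ++ xs.take (o + c - xs.length)
       else (xs.drop o).take c) := by
  have hn : 0 < xs.length := Nat.lt_of_le_of_lt (Nat.zero_le o) ho
  split_ifs with hw
  · apply List.ext_getElem
    · simp; omega
    · intro i hi _
      have hic : i < c := by simpa using hi
      have hmem : (o + i) % xs.length < xs.length := Nat.mod_lt _ hn
      rw [List.getElem_map, List.getElem_range, List.getD_eq_getElem xs _ hmem]
      by_cases hlt : o + i < xs.length
      · have hhead : i < ((xs.drop o).take c).length := by simp; omega
        rw [List.getElem_append_left hhead, List.getElem_take, List.getElem_drop]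
        congr 1
        exact Nat.mod_eq_of_lt hlt
      · have hhead : ((xs.drop o).take c).length ≤ i := by simp; omega
        rw [List.getElem_append_right hhead]
        simp only [List.getElem_take]
        have hmod : (o + i) % xs.length = o + i - xs.length := by
          rw [Nat.mod_eq_sub_mod (by omega)]
          exact Nat.mod_eq_of_lt (by omega)
        congr 1
        simp [hmod]
        omega
  · apply List.ext_getElem
    · simp; omega
    · intro i hi _
      have hic : i < c := by simpa using hi
      have hlt : o + i < xs.length := by omega
      have hmem : (o + i) % xs.length < xs.length := Nat.mod_lt _ hn
      rw [List.getElem_map, List.getElem_range, List.getD_eq_getElem xs _ hmem,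
        List.getElem_take, List.getElem_drop]
      congr 1
      exact Nat.mod_eq_of_lt hlt

-- ===== VERDICT (by name: the statement is the Claim_ definition above) =====
theorem pick_images_for_ad_py_spec : Claim_equal_pick_images_for_ad_py := by
  intro images ad_index _
  unfold Spec_pick_images_for_ad_py pick_images_for_ad_py pick_images_for_ad_py_alt
  by_cases hemp : images = []
  · simp [hemp]
  · simp only [hemp, if_false]
    have hn : 0 < images.length := List.length_pos_iff.mpr hemp
    have hnpos : (0 : Int) < (images.length : Int) := by exact_mod_cast hn
    set N : Int := (images.length : Int) with hN
    -- offset as a Nat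
    have hoff0 : 0 ≤ PySem.Int.mod (ad_index * 3) N := PySem.Int.mod_nonneg _ hnpos
    have hofflt : PySem.Int.mod (ad_index * 3) N < N := PySem.Int.mod_lt _ hnpos
    obtain ⟨o, ho⟩ : ∃ o : Nat, PySem.Int.mod (ad_index * 3) N = (o : Int) :=
      ⟨(PySem.Int.mod (ad_index * 3) N).toNat, (Int.toNat_of_nonneg hoff0).symm⟩
    have holt : o < images.length := by
      rw [ho, hN] at hofflt; exact_mod_cast hofflt
    rw [ho]
    -- count as a Nat
    have hcount : min 3 N = ((min 3 images.length : Nat) : Int) := by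
      push_cast; rfl
    rw [hcount]
    set c : Nat := min 3 images.length with hcdef
    have hcle : c ≤ images.length := Nat.min_le_right _ _
    -- A side: fold is a map over range c
    rw [PySem.List.pyRange_zero_natCast, PySem.List.foldl_append_singleton_eq_map,
      List.nil_append, List.map_map]
    -- B head slice
    rw [PySem.List.slice_natCast_add]
    have hAel : ∀ i : Nat, i < c →
        PySem.List.pyGetD images (PySem.Int.mod ((o : Int) + (i : Int)) N) "" =
          images.getD ((o + i) % images.length) "" := by
      intro i hi
      rw [PySem.Int.mod_eq_emod_of_pos hnpos]
      have : ((o : Int) + (i : Int)) % N = (((o + i) % images.length : Nat) : Int) := by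
        rw [hN]; push_cast; rfl
      rw [this, PySem.List.pyGetD_natCast]
    have hmapA : (List.range c).map
        ((fun i => PySem.List.pyGetD images (PySem.Int.mod ((o : Int) + i) N) "") ∘ (fun k : Nat => (k : Int)))
        = (List.range c).map (fun i => images.getD ((o + i) % images.length) "") := by
      apply List.map_congr_left
      intro i hi
      exact hAel i (List.mem_range.mp hi)
    rw [hmapA, cyclic_window_eq images o c holt hcle]
    by_cases hw : (o : Int) + (c : Int) > N
    · have hwN : images.length < o + c := by omega
      have htail : (o : Int) + (c : Int) - N = (((o + c - images.length : Nat)) : Int) := by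
        omega
      rw [if_pos hw, if_pos hwN, htail, PySem.List.slice_to_natCast]
    · have hwN : ¬ images.length < o + c := by omega
      rw [if_neg hw, if_neg hwN]
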